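-- pv_equiv track=rewrite | github.com/echan227/atrial_strain | common_utils/utils.py | anonymise_UID_date
-- ===== SOURCE A (Python) =====
-- def anonymise_UID_date(UID, study_date):
--     UID_split = UID.split('.')
--     UID_anon = []
--     for UID_date in UID_split:
--         if study_date in UID_date:
--             UID_date = UID_date.replace(study_date, str(int(study_date) - 1000))  # subtract one year from UID_date
--         UID_anon.append(UID_date)
--     UID_anon = '.'.join(UID_anon)
--     return UID_anon
-- ===== SOURCE B (Python) =====
-- def anonymise_UID_date(UID, study_date):
--     # study_date never spans a '.' boundary unless it contains '.', in which
--     # case no dot-free segment can contain it; so one whole-string replace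
--     # hits exactly the occurrences the per-segment loop would.
--     if '.' not in study_date and study_date in UID:
--         return UID.replace(study_date, str(int(study_date) - 1000))
--     return UID
-- ===== Notes on version B (the rewrite author's own statement) =====
-- stated objective: simpler
-- what changed: The split-on-'.'/per-segment-replace/join pipeline is replaced by one guarded whole-string replace: since a dot-free study_date never spans a '.' boundary (and a study_date containing '.' fits in no segment), 'if '.' not in study_date and study_date in UID: UID.replace(...)' hits exactly the same occurrences.
import Mathlib
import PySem

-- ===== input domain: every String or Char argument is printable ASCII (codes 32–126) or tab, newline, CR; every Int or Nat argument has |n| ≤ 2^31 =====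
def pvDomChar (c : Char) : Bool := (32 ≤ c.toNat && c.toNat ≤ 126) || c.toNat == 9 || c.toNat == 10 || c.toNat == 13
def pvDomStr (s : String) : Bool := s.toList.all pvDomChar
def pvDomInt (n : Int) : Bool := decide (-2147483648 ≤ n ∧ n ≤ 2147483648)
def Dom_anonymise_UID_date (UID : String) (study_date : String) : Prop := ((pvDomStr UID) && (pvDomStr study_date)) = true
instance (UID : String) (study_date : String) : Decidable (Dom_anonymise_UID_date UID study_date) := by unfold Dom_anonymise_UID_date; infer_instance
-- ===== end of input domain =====

-- B replaces A's split-on-'.' / per-segment-replace / join pipeline by a single guarded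
-- whole-string replace (a dot-free study_date never spans a '.' boundary); objective: simpler.


-- ===== PORT A =====
-- UID.split('.'): the separator "." is non-empty, so Str.split? is always `some`; .getD [] is never hit.
-- int(study_date) is ported as (PySem.Int.ofStr? study_date).getD 0: the `none` case is a Python
-- ValueError and exactly those inputs are excluded by Pre_ below.
def anonymise_UID_date (UID : String) (study_date : String) : String :=
  let UID_split := (PySem.Str.split? UID ".").getD []
  let UID_anon := UID_split.foldl (fun acc UID_date =>
    acc ++ [if PySem.Str.isIn study_date UID_date then
              PySem.Str.replace UID_date study_date
                (PySem.Int.toStr ((PySem.Int.ofStr? study_date).getD 0 - 1000))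
            else UID_date]) []
  PySem.Str.join "." UID_anon

-- ===== PORT B =====
-- int(study_date) as in port A: ofStr? = none is the ValueError excluded by Pre_.
def anonymise_UID_date_alt (UID : String) (study_date : String) : String :=
  if !PySem.Str.isIn "." study_date && PySem.Str.isIn study_date UID then
    PySem.Str.replace UID study_date
      (PySem.Int.toStr ((PySem.Int.ofStr? study_date).getD 0 - 1000))
  else UID

-- ===== PRECONDITION & SPEC =====
-- Pre_ excludes exactly the inputs where Python A raises ValueError: a dot-free, non-integer
-- study_date that occurs in UID (Python B raises the same ValueError there).
def Pre_anonymise_UID_date (UID : String) (study_date : String) : Prop :=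
  PySem.Str.isIn "." study_date = true ∨ PySem.Str.isIn study_date UID = false ∨
    (PySem.Int.ofStr? study_date).isSome = true
instance (UID : String) (study_date : String) : Decidable (Pre_anonymise_UID_date UID study_date) := by
  unfold Pre_anonymise_UID_date; infer_instance

def pvWitness_anonymise_UID_date : String × String := ("1.2.840.20200101.7", "20200101")

def Spec_anonymise_UID_date (UID : String) (study_date : String) (out : String) : Prop := out = anonymise_UID_date_alt UID study_date
instance (UID : String) (study_date : String) (out : String) : Decidable (Spec_anonymise_UID_date UID study_date out) := by unfold Spec_anonymise_UID_date; infer_instance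

-- ===== CLAIM (what is proved, stated in full; the proofs are below) =====
def Claim_equal_anonymise_UID_date : Prop := ∀ (UID : String) (study_date : String), Dom_anonymise_UID_date UID study_date → Pre_anonymise_UID_date UID study_date → Spec_anonymise_UID_date UID study_date (anonymise_UID_date UID study_date)

-- ===== LEMMAS AND PROOFS =====

-- A clean model of Python's s.split('.') on List Char.
def splitD : List Char → List (List Char)
  | [] => [[]]
  | c :: t => if c = '.' then [] :: splitD t else (splitD t).modifyHead (c :: ·)

-- A clean model of Python's s.replace(old, new) for old ≠ "" on List Char.
def Rrepl (old new : List Char) : List Char → List Char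
  | [] => []
  | c :: t =>
    if old.isPrefixOf (c :: t) && !old.isEmpty then
      new ++ Rrepl old new (t.drop (old.length - 1))
    else c :: Rrepl old new t
termination_by l => l.length
decreasing_by all_goals simp

theorem splitD_head : ∀ cs : List Char, ∃ h tl, splitD cs = h :: tl ∧ h <+: cs ∧ '.' ∉ h := by
  intro cs
  induction cs with
  | nil => exact ⟨[], [], rfl, List.nil_prefix, by simp⟩
  | cons c t ih =>
    by_cases hc : c = '.'
    · exact ⟨[], splitD t, by simp [splitD, hc], List.nil_prefix, by simp⟩
    · obtain ⟨h, tl, hst, hpre, hdot⟩ := ih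
      exact ⟨c :: h, tl, by simp [splitD, hc, hst], List.cons_prefix_cons.mpr ⟨rfl, hpre⟩,
        by simp [hdot, Ne.symm hc]⟩

theorem splitD_no_dot : ∀ (cs : List Char), ∀ seg ∈ splitD cs, '.' ∉ seg := by
  intro cs
  induction cs with
  | nil => intro seg hseg; simp [splitD] at hseg; simp [hseg]
  | cons c t ih =>
    intro seg hseg
    by_cases hc : c = '.'
    · simp [splitD, hc] at hseg
      rcases hseg with h | h
      · simp [h]
      · exact ih seg h
    · obtain ⟨h, tl, hst, _, hdot⟩ := splitD_head t
      simp [splitD, hc, hst] at hseg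
      rcases hseg with rfl | hmem
      · simp [Ne.symm hc, hdot]
      · exact ih seg (by simp [hst, hmem])

theorem splitD_infix : ∀ (cs : List Char), ∀ seg ∈ splitD cs, seg <:+: cs := by
  intro cs
  induction cs with
  | nil => intro seg hseg; simp [splitD] at hseg; simp [hseg]
  | cons c t ih =>
    intro seg hseg
    by_cases hc : c = '.'
    · simp [splitD, hc] at hseg
      rcases hseg with h | h
      · simp [h]
      · exact List.infix_cons (ih seg h)
    · obtain ⟨h, tl, hst, hpre, _⟩ := splitD_head t
      simp [splitD, hc, hst] at hseg
      rcases hseg with rfl | hmem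
      · exact (List.cons_prefix_cons.mpr ⟨rfl, hpre⟩).isInfix
      · exact List.infix_cons (ih seg (by simp [hst, hmem]))

-- The accumulator-passing fueled splitter of PySem equals splitD.
theorem splitOn_go_eq : ∀ (fuel : Nat) (l cur : List Char) (acc : List (List Char)),
    l.length ≤ fuel →
    PySem.Chars.splitOn.go ['.'] fuel l cur acc
      = acc.reverse ++ (splitD l).modifyHead (cur.reverse ++ ·) := by
  intro fuel
  induction fuel with
  | zero =>
    intro l cur acc hl
    have : l = [] := List.eq_nil_of_length_eq_zero (Nat.le_zero.mp hl)
    subst this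
    simp [PySem.Chars.splitOn.go.eq_def, splitD]
  | succ n ih =>
    intro l cur acc hl
    cases l with
    | nil =>
      simp [PySem.Chars.splitOn.go.eq_def, splitD]
    | cons c rest =>
      rw [PySem.Chars.splitOn.go.eq_def]
      simp only []
      by_cases hc : c = '.'
      · have hpfx : List.isPrefixOf ['.'] (c :: rest) = true := by
          simp [List.isPrefixOf, hc]
        rw [if_pos hpfx]
        have := ih rest [] (cur.reverse :: acc) (by simpa using Nat.le_of_succ_le_succ hl)
        simp only [List.length_singleton, List.drop_one, List.tail_cons] at this ⊢
        rw [this]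
        obtain ⟨h, tl, hst, _, _⟩ := splitD_head rest
        simp [splitD, hc, hst]
      · have hpfx : List.isPrefixOf ['.'] (c :: rest) = false := by
          simp [List.isPrefixOf]; exact fun h => absurd h.symm hc
        rw [if_neg (by simp [hpfx])]
        rw [ih rest (c :: cur) acc (by simpa using Nat.le_of_succ_le_succ hl)]
        obtain ⟨h, tl, hst, _, _⟩ := splitD_head rest
        simp [splitD, hc, hst]

theorem splitOn_eq_splitD (cs : List Char) : PySem.Chars.splitOn cs ['.'] = splitD cs := by
  unfold PySem.Chars.splitOn
  rw [splitOn_go_eq (cs.length + 1) cs [] [] (Nat.le_succ _)]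
  obtain ⟨h, tl, hst, _, _⟩ := splitD_head cs
  simp [hst]

-- The accumulator-passing fueled replacer of PySem equals Rrepl (old ≠ []).
theorem replace_go_eq (old new : List Char) (hold : old ≠ []) :
    ∀ (fuel : Nat) (l acc : List Char), l.length ≤ fuel →
    PySem.Chars.replace.go old new fuel l acc = acc.reverse ++ Rrepl old new l := by
  intro fuel
  induction fuel with
  | zero =>
    intro l acc hl
    have : l = [] := List.eq_nil_of_length_eq_zero (Nat.le_zero.mp hl)
    subst this
    simp [PySem.Chars.replace.go.eq_def, Rrepl]
  | succ n ih =>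
    intro l acc hl
    cases l with
    | nil =>
      simp [PySem.Chars.replace.go.eq_def, Rrepl]
    | cons c t =>
      rw [PySem.Chars.replace.go.eq_def]
      simp only []
      obtain ⟨o, os, rfl⟩ : ∃ o os, old = o :: os := by
        cases old with
        | nil => exact absurd rfl hold
        | cons o os => exact ⟨o, os, rfl⟩
      by_cases hpfx : List.isPrefixOf (o :: os) (c :: t) = true
      · rw [if_pos hpfx]
        have hlen : (List.drop (o :: os).length (c :: t)).length ≤ n := by
          simp at hl ⊢; omega
        rw [ih _ _ hlen]
        rw [Rrepl]
        simp only [hpfx, List.isEmpty_cons, Bool.not_false, Bool.and_self, if_pos]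
        simp [List.drop_succ_cons]
      · rw [if_neg hpfx]
        rw [ih t (c :: acc) (by simpa using Nat.le_of_succ_le_succ hl)]
        rw [Rrepl]
        simp [hpfx]

theorem replace_eq_Rrepl (l old new : List Char) (hold : old ≠ []) :
    PySem.Chars.replace l old new = Rrepl old new l := by
  unfold PySem.Chars.replace
  rw [if_neg (by simp [hold])]
  rw [replace_go_eq old new hold l.length l [] (le_refl _)]
  simp

theorem Rrepl_of_not_infix (old new : List Char) :
    ∀ seg : List Char, ¬ old <:+: seg → Rrepl old new seg = seg := by
  intro seg
  induction seg with
  | nil => intro _; simp [Rrepl]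
  | cons c t ih =>
    intro hni
    have hpfx : List.isPrefixOf old (c :: t) = false := by
      by_contra h
      have : old <+: c :: t := List.isPrefixOf_iff_prefix.mp (by simpa using h)
      exact hni this.isInfix
    rw [Rrepl]
    simp only [hpfx, Bool.false_and, if_neg Bool.false_ne_true]
    rw [ih (fun h => hni (List.infix_cons h))]

theorem singleton_infix_iff (a : Char) (l : List Char) : [a] <:+: l ↔ a ∈ l := by
  constructor
  · intro h; exact h.subset (by simp)
  · intro h
    obtain ⟨s, t, rfl⟩ := List.append_of_mem h
    exact ⟨s, t, by simp⟩

theorem prefix_splitD_drop (sd : List Char) (hdot : '.' ∉ sd) :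
    ∀ cs : List Char, sd <+: cs →
    splitD cs = (splitD (cs.drop sd.length)).modifyHead (sd ++ ·) := by
  induction sd with
  | nil =>
    intro cs _
    obtain ⟨h, tl, hst, _, _⟩ := splitD_head cs
    simp [hst]
  | cons a sd' ih =>
    intro cs hpre
    obtain ⟨cs', rfl, hpre'⟩ : ∃ cs', cs = a :: cs' ∧ sd' <+: cs' := by
      cases cs with
      | nil => exact absurd (List.prefix_nil.mp hpre) (by simp)
      | cons b cs' =>
        obtain ⟨hb, h2⟩ := List.cons_prefix_cons.mp hpre
        exact ⟨cs', by rw [hb], h2⟩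
    have ha : a ≠ '.' := fun h => hdot (by simp [h])
    have hdot' : '.' ∉ sd' := fun h => hdot (by simp [h])
    rw [show splitD (a :: cs') = (splitD cs').modifyHead (a :: ·) by simp [splitD, ha]]
    rw [ih hdot' cs' hpre']
    obtain ⟨h, tl, hst, _, _⟩ := splitD_head (cs'.drop sd'.length)
    simp [hst, List.drop_succ_cons]

theorem join_prepend (p h : List Char) (tl : List (List Char)) :
    PySem.Chars.join ['.'] ((p ++ h) :: tl) = p ++ PySem.Chars.join ['.'] (h :: tl) := by
  cases tl with
  | nil => simp [PySem.Chars.join_singleton]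
  | cons q r => simp [PySem.Chars.join_cons_cons, List.append_assoc]

theorem join_splitD (cs : List Char) : PySem.Chars.join ['.'] (splitD cs) = cs := by
  induction cs with
  | nil => simp [splitD, PySem.Chars.join_singleton]
  | cons c t ih =>
    obtain ⟨h, tl, hst, _, _⟩ := splitD_head t
    by_cases hc : c = '.'
    · rw [show splitD (c :: t) = [] :: splitD t by simp [splitD, hc]]
      rw [hst, PySem.Chars.join_cons_cons, ← hst, ih, hc]
      simp
    · rw [show splitD (c :: t) = (c :: h) :: tl by simp [splitD, hc, hst]]
      rw [show (c :: h) = [c] ++ h by simp, join_prepend, ← hst, ih]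
      simp

-- The heart of the equivalence: for a dot-free non-empty pattern, replacing inside each
-- '.'-segment and re-joining equals one whole-string replace.
theorem main_join (sd new : List Char) (hsd : sd ≠ []) (hdot : '.' ∉ sd) :
    ∀ (n : Nat) (cs : List Char), cs.length ≤ n →
    PySem.Chars.join ['.'] ((splitD cs).map (Rrepl sd new)) = Rrepl sd new cs := by
  intro n
  induction n with
  | zero =>
    intro cs hl
    have : cs = [] := List.eq_nil_of_length_eq_zero (Nat.le_zero.mp hl)
    subst this
    simp [splitD, Rrepl, PySem.Chars.join_singleton]
  | succ n ih =>
    intro cs hl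
    by_cases hp : sd <+: cs
    · -- pattern matches at the front: both sides emit `new` and recurse past it
      obtain ⟨o, os, rfl⟩ : ∃ o os, sd = o :: os := by
        cases sd with
        | nil => exact absurd rfl hsd
        | cons o os => exact ⟨o, os, rfl⟩
      obtain ⟨cs', rfl, hos⟩ : ∃ cs', cs = o :: cs' ∧ os <+: cs' := by
        cases cs with
        | nil => exact absurd (List.prefix_nil.mp hp) (by simp)
        | cons b cs' =>
          obtain ⟨hb, h2⟩ := List.cons_prefix_cons.mp hp
          exact ⟨cs', by rw [hb], h2⟩
      rw [prefix_splitD_drop (o :: os) hdot (o :: cs') hp]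
      obtain ⟨h, tl, hst, _, _⟩ := splitD_head ((o :: cs').drop (o :: os).length)
      rw [hst]
      simp only [List.modifyHead_cons, List.map_cons]
      have hro : Rrepl (o :: os) new ((o :: os) ++ h) = new ++ Rrepl (o :: os) new h := by
        rw [show ((o :: os) ++ h) = o :: (os ++ h) by simp]
        rw [Rrepl]
        rw [if_pos (by simp [List.isPrefixOf_iff_prefix])]
        simp
      rw [hro, join_prepend, ← List.map_cons, ← hst]
      have hlen : ((o :: cs').drop (o :: os).length).length ≤ n := by simp at hl ⊢; omega
      rw [ih _ hlen]
      rw [show Rrepl (o :: os) new (o :: cs')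
            = new ++ Rrepl (o :: os) new (cs'.drop ((o :: os).length - 1)) by
        rw [Rrepl]; rw [if_pos (by simp [List.isPrefixOf_iff_prefix]; exact hos)]]
      simp [List.drop_succ_cons]
    · cases cs with
      | nil => simp [splitD, Rrepl, PySem.Chars.join_singleton]
      | cons c t =>
        have hlen : t.length ≤ n := by simpa using Nat.le_of_succ_le_succ hl
        have hnp : List.isPrefixOf sd (c :: t) = false := by
          by_contra h
          exact hp (List.isPrefixOf_iff_prefix.mp (by simpa using h))
        have hrhs : Rrepl sd new (c :: t) = c :: Rrepl sd new t := by
          rw [Rrepl]; simp [hnp]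
        obtain ⟨h, tl, hst, hhp, _⟩ := splitD_head t
        by_cases hc : c = '.'
        · rw [show splitD (c :: t) = [] :: splitD t by simp [splitD, hc]]
          rw [hst]
          simp only [List.map_cons]
          rw [show Rrepl sd new [] = [] by simp [Rrepl]]
          rw [PySem.Chars.join_cons_cons, ← List.map_cons, ← hst, ih t hlen, hrhs, hc]
          simp
        · rw [show splitD (c :: t) = (c :: h) :: tl by simp [splitD, hc, hst]]
          have hch : Rrepl sd new (c :: h) = c :: Rrepl sd new h := by
            have : ¬ sd <+: (c :: h) := fun hpre =>
              hp (hpre.trans (List.cons_prefix_cons.mpr ⟨rfl, hhp⟩))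
            rw [Rrepl]
            rw [if_neg (by simp [List.isPrefixOf_iff_prefix]; intro hh; exact absurd hh this)]
          simp only [List.map_cons, hch]
          rw [show (c :: Rrepl sd new h) = [c] ++ Rrepl sd new h by simp]
          rw [join_prepend, ← List.map_cons, ← hst, ih t hlen, hrhs]
          simp

-- Both ports, pushed down to List Char.
theorem portA_toList (UID study_date : String) :
    (anonymise_UID_date UID study_date).toList
      = PySem.Chars.join ['.'] ((splitD UID.toList).map (fun g =>
          if PySem.Chars.isIn study_date.toList g then
            PySem.Chars.replace g study_date.toList
              (PySem.Int.toStr ((PySem.Int.ofStr? study_date).getD 0 - 1000)).toList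
          else g)) := by
  simp only [anonymise_UID_date]
  rw [PySem.List.foldl_append_singleton_eq_map (fun UID_date =>
    if PySem.Str.isIn study_date UID_date then
      PySem.Str.replace UID_date study_date
        (PySem.Int.toStr ((PySem.Int.ofStr? study_date).getD 0 - 1000))
    else UID_date)]
  have hsplit : (PySem.Str.split? UID ".").getD []
      = (PySem.Chars.splitOn UID.toList ['.']).map String.ofList := by
    rw [PySem.Str.split?]
    rw [show PySem.Chars.split? UID.toList ".".toList
          = some (PySem.Chars.splitOn UID.toList ['.']) by
      rw [PySem.Chars.split?]; simp [show ".".toList = ['.'] from rfl]]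
    simp
  rw [hsplit, PySem.Str.toList_join]
  simp only [List.nil_append, List.map_map]
  rw [splitOn_eq_splitD, show ".".toList = ['.'] from rfl]
  congr 1
  apply List.map_congr_left
  intro g _
  simp only [Function.comp_apply]
  by_cases hin : PySem.Chars.isIn study_date.toList g = true
  · rw [if_pos (by rw [PySem.Str.isIn_eq]; simpa using hin), if_pos hin]
    rw [PySem.Str.toList_replace]
    simp
  · rw [if_neg (by rw [PySem.Str.isIn_eq]; simpa using hin), if_neg hin]
    simp

-- ===== VERDICT (by name: the statement is the Claim_ definition above) =====
theorem anonymise_UID_date_spec : Claim_equal_anonymise_UID_date := by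
  intro UID study_date _hdom hpre
  unfold Spec_anonymise_UID_date
  apply String.toList_inj.mp
  rw [portA_toList]
  unfold anonymise_UID_date_alt
  set nl := (PySem.Int.toStr ((PySem.Int.ofStr? study_date).getD 0 - 1000)).toList with hnl
  by_cases h1 : PySem.Chars.isIn ['.'] study_date.toList = true
  · -- study_date contains '.': no segment can contain it; both sides return UID
    have hd : '.' ∈ study_date.toList :=
      (singleton_infix_iff _ _).mp ((PySem.Chars.isIn_iff_infix _ _).mp h1)
    rw [if_neg (by simp [PySem.Str.isIn_eq, show ".".toList = ['.'] from rfl, h1])]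
    have hid : ∀ g ∈ splitD UID.toList,
        (if PySem.Chars.isIn study_date.toList g = true then
          PySem.Chars.replace g study_date.toList nl else g) = id g := by
      intro g hg
      simp only [id_eq]
      have hnotin : ¬ PySem.Chars.isIn study_date.toList g = true := by
        intro hin
        exact splitD_no_dot UID.toList g hg (((PySem.Chars.isIn_iff_infix _ _).mp hin).subset hd)
      rw [if_neg hnotin]
    rw [List.map_congr_left hid, List.map_id]
    exact join_splitD UID.toList
  · by_cases h2 : PySem.Chars.isIn study_date.toList UID.toList = true
    · -- dot-free study_date occurring in UID: one whole-string replace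
      have hdot : '.' ∉ study_date.toList := by
        intro hmem
        exact h1 ((PySem.Chars.isIn_iff_infix _ _).mpr ((singleton_infix_iff _ _).mpr hmem))
      have hsome : (PySem.Int.ofStr? study_date).isSome = true := by
        rcases hpre with h | h | h
        · exact absurd (by rwa [PySem.Str.isIn_eq, show ".".toList = ['.'] from rfl] at h) h1
        · rw [PySem.Str.isIn_eq] at h
          rw [h] at h2
          simp at h2
        · exact h
      have hsd : study_date.toList ≠ [] := by
        intro hnil
        have : study_date = "" := String.toList_inj.mp (by simp [hnil])
        rw [this] at hsome
        simp [show PySem.Int.ofStr? "" = none from rfl] at hsome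
      rw [if_pos (by simp [PySem.Str.isIn_eq, show ".".toList = ['.'] from rfl, h1, h2])]
      rw [PySem.Str.toList_replace, ← hnl, replace_eq_Rrepl _ _ _ hsd]
      have hmap : ∀ g ∈ splitD UID.toList,
          (if PySem.Chars.isIn study_date.toList g = true then
            PySem.Chars.replace g study_date.toList nl else g)
          = Rrepl study_date.toList nl g := by
        intro g _
        by_cases hin : PySem.Chars.isIn study_date.toList g = true
        · rw [if_pos hin]; exact replace_eq_Rrepl _ _ _ hsd
        · rw [if_neg hin]
          refine (Rrepl_of_not_infix _ _ g ?_).symm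
          intro hinf
          exact hin ((PySem.Chars.isIn_iff_infix _ _).mpr hinf)
      rw [List.map_congr_left hmap]
      exact main_join study_date.toList nl hsd hdot UID.toList.length UID.toList (le_refl _)
    · -- study_date absent from UID: no segment can contain it; both sides return UID
      rw [if_neg (by simp [PySem.Str.isIn_eq, h2])]
      have hid : ∀ g ∈ splitD UID.toList,
          (if PySem.Chars.isIn study_date.toList g = true then
            PySem.Chars.replace g study_date.toList nl else g) = id g := by
        intro g hg
        simp only [id_eq]
        have hnotin : ¬ PySem.Chars.isIn study_date.toList g = true := by
          intro hin
          exact h2 ((PySem.Chars.isIn_iff_infix _ _).mpr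
            (((PySem.Chars.isIn_iff_infix _ _).mp hin).trans (splitD_infix UID.toList g hg)))
        rw [if_neg hnotin]
      rw [List.map_congr_left hid, List.map_id]
      exact join_splitD UID.toList
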